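-- pv_equiv track=rewrite | github.com/pypi-data/pypi-mirror-368 | packages/lhcb-rex/lhcb_rex-0.1.5.tar.gz/lhcb_rex-0.1.5/src/lhcb_rex/inference/inference_graph_constructor.py | reindex_particle_types_by_class
-- ===== SOURCE A (Python) =====
-- def reindex_particle_types_by_class(particle_types):
--     class_counters = {"mother": 0, "intermediate": 0, "track": 0}
--     reindexed = {}
--
--     for node_id in sorted(particle_types):  # ensure order by node ID
--         p_type = particle_types[node_id]
--         local_index = class_counters[p_type]
--         reindexed[node_id] = (local_index, p_type)
--         class_counters[p_type] += 1
--
--     return reindexed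
-- ===== SOURCE B (Python) =====
-- def reindex_particle_types_by_class(particle_types):
--     ordered_ids = sorted(particle_types)  # ensure order by node ID
--
--     # pass 1: partition the node IDs into per-class member lists
--     groups = {"mother": [], "intermediate": [], "track": []}
--     for node_id in ordered_ids:
--         groups[particle_types[node_id]].append(node_id)
--
--     # pass 2: each class list is already in node-ID order, so its
--     # enumeration indices are exactly the per-class local indices
--     placement = {}
--     for p_type, members in groups.items():
--         for local_index, node_id in enumerate(members):
--             placement[node_id] = (local_index, p_type)
--
--     # assemble the output in node-ID order
--     return {node_id: placement[node_id] for node_id in ordered_ids}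
-- ===== Notes on version B (the rewrite author's own statement) =====
-- stated objective: alternative
-- what changed: Replaces the single pass with mutable per-class counters by a partition-then-enumerate decomposition: one pass groups sorted node IDs into per-class lists, a second pass enumerates each list to assign local indices, and a final comprehension reassembles the mapping in node-ID order.
import Mathlib
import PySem

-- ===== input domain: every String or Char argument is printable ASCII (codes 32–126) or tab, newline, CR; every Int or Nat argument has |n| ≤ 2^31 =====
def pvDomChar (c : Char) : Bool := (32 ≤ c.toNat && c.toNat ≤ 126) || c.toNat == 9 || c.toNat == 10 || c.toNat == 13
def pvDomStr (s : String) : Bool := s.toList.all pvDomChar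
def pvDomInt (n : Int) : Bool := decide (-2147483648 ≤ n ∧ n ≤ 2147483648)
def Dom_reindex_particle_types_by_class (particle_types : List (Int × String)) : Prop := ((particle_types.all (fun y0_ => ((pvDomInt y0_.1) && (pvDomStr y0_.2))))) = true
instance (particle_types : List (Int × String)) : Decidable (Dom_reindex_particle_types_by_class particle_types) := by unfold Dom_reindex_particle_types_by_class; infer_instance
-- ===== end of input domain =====

-- B replaces A's running per-class counters by a partition-then-enumerate decomposition
-- (group sorted node IDs by class, enumerate each group, reassemble in node-ID order);
-- same cost, proved to return the same mapping.


-- ===== PORT A =====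
-- loop body of A's single pass: look the type up in class_counters (KeyError → Pre_),
-- record (local_index, p_type), bump the counter.
def pvStepA (d : PySem.Dict Int String)
    (s : PySem.Dict String Int × PySem.Dict Int (Int × String)) (nid : Int) :
    PySem.Dict String Int × PySem.Dict Int (Int × String) :=
  let p := PySem.Dict.getD d nid ""
  match PySem.Dict.get? s.1 p with
  | some li => (PySem.Dict.insert s.1 p (li + 1), PySem.Dict.insert s.2 nid (li, p))
  | none => s  -- Python raises KeyError here; Pre_ excludes these inputs

def reindex_particle_types_by_class (particle_types : List (Int × String)) : List (Int × Int × String) :=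
  let d := PySem.Dict.mk particle_types
  let st := (PySem.List.sorted (PySem.Dict.keys d) (fun x => x) false).foldl (pvStepA d)
    (PySem.Dict.mk [("mother", 0), ("intermediate", 0), ("track", 0)], PySem.Dict.empty)
  st.2.items

-- ===== PORT B =====
-- loop bodies of B's three passes
def pvGroupStep (d : PySem.Dict Int String) (g : PySem.Dict String (List Int)) (nid : Int) :
    PySem.Dict String (List Int) :=
  PySem.Dict.modify g (PySem.Dict.getD d nid "") [] (fun l => l ++ [nid])

def pvPlaceGroup (pl : PySem.Dict Int (Int × String)) (pm : String × List Int) :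
    PySem.Dict Int (Int × String) :=
  (PySem.List.enumerate pm.2 0).foldl (fun pl e => PySem.Dict.insert pl e.2 (e.1, pm.1)) pl

def pvAssembleStep (placement : PySem.Dict Int (Int × String))
    (out : PySem.Dict Int (Int × String)) (nid : Int) : PySem.Dict Int (Int × String) :=
  PySem.Dict.insert out nid (PySem.Dict.getD placement nid (0, ""))

def reindex_particle_types_by_class_alt (particle_types : List (Int × String)) : List (Int × Int × String) :=
  let d := PySem.Dict.mk particle_types
  let ordered_ids := PySem.List.sorted (PySem.Dict.keys d) (fun x => x) false
  -- pass 1: partition the node IDs into per-class member lists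
  let groups := ordered_ids.foldl (pvGroupStep d)
    (PySem.Dict.mk [("mother", []), ("intermediate", []), ("track", [])])
  -- pass 2: enumerate each class list
  let placement := groups.items.foldl pvPlaceGroup PySem.Dict.empty
  -- assemble the output in node-ID order
  (ordered_ids.foldl (pvAssembleStep placement) PySem.Dict.empty).items

-- ===== PRECONDITION & SPEC =====
-- Pre_ excludes (a) association lists with duplicate keys, which represent no Python dict
-- (the argument is a dict, so its keys are unique), and (b) dicts with a value other than
-- "mother"/"intermediate"/"track", on which A raises KeyError.
def Pre_reindex_particle_types_by_class (particle_types : List (Int × String)) : Prop :=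
  (particle_types.map Prod.fst).Nodup ∧
  ∀ p ∈ particle_types, p.2 = "mother" ∨ p.2 = "intermediate" ∨ p.2 = "track"
instance (particle_types : List (Int × String)) : Decidable (Pre_reindex_particle_types_by_class particle_types) := by unfold Pre_reindex_particle_types_by_class; infer_instance

def pvWitness_reindex_particle_types_by_class : (List (Int × String)) :=
  [(2, "track"), (1, "mother"), (3, "track"), (0, "intermediate")]

def Spec_reindex_particle_types_by_class (particle_types : List (Int × String)) (out : List (Int × Int × String)) : Prop := out = reindex_particle_types_by_class_alt particle_types
instance (particle_types : List (Int × String)) (out : List (Int × Int × String)) : Decidable (Spec_reindex_particle_types_by_class particle_types out) := by unfold Spec_reindex_particle_types_by_class; infer_instance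

-- ===== CLAIM (what is proved, stated in full; the proofs are below) =====
def Claim_equal_reindex_particle_types_by_class : Prop := ∀ (particle_types : List (Int × String)), Dom_reindex_particle_types_by_class particle_types → Pre_reindex_particle_types_by_class particle_types → Spec_reindex_particle_types_by_class particle_types (reindex_particle_types_by_class particle_types)

-- ===== LEMMAS AND PROOFS =====

-- the class of a node id, as both ports read it
def pvCls (d : PySem.Dict Int String) (nid : Int) : String := PySem.Dict.getD d nid ""

-- abstract description of A's loop: emit each node with the running count of its class, bump it
def pvBuild (d : PySem.Dict Int String) : List Int → (String → Int) → List (Int × Int × String)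
  | [], _ => []
  | nid :: rest, m =>
      (nid, (m (pvCls d nid), pvCls d nid)) ::
        pvBuild d rest (fun p => if p = pvCls d nid then m p + 1 else m p)

-- A's loop produces pvBuild
lemma loopA_items (d : PySem.Dict Int String) :
    ∀ (ids : List Int) (c : PySem.Dict String Int) (r : PySem.Dict Int (Int × String)),
    (∀ nid ∈ ids, (PySem.Dict.get? c (pvCls d nid)).isSome) →
    ids.Nodup →
    (∀ nid ∈ ids, PySem.Dict.contains r nid = false) →
    (ids.foldl (pvStepA d) (c, r)).2.items
      = r.items ++ pvBuild d ids (fun p => PySem.Dict.getD c p 0) := by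
  intro ids
  induction ids with
  | nil => intro c r _ _ _; simp [pvBuild]
  | cons nid rest ih =>
    intro c r h1 hnd h3
    obtain ⟨li, hli⟩ := Option.isSome_iff_exists.mp (h1 nid (List.mem_cons_self))
    have hgetD : PySem.Dict.getD c (pvCls d nid) 0 = li := by
      rw [PySem.Dict.getD_eq_get?_getD, hli]; rfl
    have hstep : pvStepA d (c, r) nid
        = (PySem.Dict.insert c (pvCls d nid) (li + 1),
           PySem.Dict.insert r nid (li, pvCls d nid)) := by
      simp [pvStepA, pvCls] at hli ⊢
      rw [hli]
    rw [List.foldl_cons, hstep]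
    have hnodup := (List.nodup_cons.mp hnd)
    rw [ih _ _ ?h1 hnodup.2 ?h3]
    · rw [PySem.Dict.items_insert_of_not_contains _ _ (h3 nid List.mem_cons_self)]
      have hm : (fun p => (PySem.Dict.insert c (pvCls d nid) (li + 1)).getD p 0)
          = (fun p => if p = pvCls d nid then PySem.Dict.getD c p 0 + 1 else PySem.Dict.getD c p 0) := by
        funext p
        rw [PySem.Dict.getD_insert]
        split_ifs with h
        · rw [h, hgetD]
        · rfl
      simp only [pvBuild, hgetD, hm, List.append_assoc, List.singleton_append]
    case h1 =>
      intro nid' hm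
      rw [PySem.Dict.get?_insert]
      split_ifs with h
      · rfl
      · exact h1 nid' (List.mem_cons_of_mem _ hm)
    case h3 =>
      intro nid' hm
      rw [PySem.Dict.contains_insert]
      have : nid' ≠ nid := fun e => hnodup.1 (e ▸ hm)
      simp [this, h3 nid' (List.mem_cons_of_mem _ hm)]

-- pvBuild with prefix counts is the idxOf-in-class-filter map
lemma pvBuild_eq_map (d : PySem.Dict Int String) :
    ∀ (ids pre : List Int), ids.Nodup → (∀ nid ∈ ids, nid ∉ pre) →
    pvBuild d ids (fun p => (pre.countP (fun o => pvCls d o == p) : Int))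
      = ids.map (fun nid => (nid,
          ((List.idxOf nid ((pre ++ ids).filter (fun o => pvCls d o == pvCls d nid)) : Int),
           pvCls d nid))) := by
  intro ids
  induction ids with
  | nil => intro pre _ _; simp [pvBuild]
  | cons nid rest ih =>
    intro pre hnd hdisj
    obtain ⟨hnotin, hndr⟩ := List.nodup_cons.mp hnd
    have happ : pre ++ nid :: rest = (pre ++ [nid]) ++ rest := by simp
    have hfilter : (pre ++ nid :: rest).filter (fun o => pvCls d o == pvCls d nid)
        = pre.filter (fun o => pvCls d o == pvCls d nid)
          ++ nid :: rest.filter (fun o => pvCls d o == pvCls d nid) := by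
      rw [List.filter_append, List.filter_cons]
      simp
    have hninpre : nid ∉ pre.filter (fun o => pvCls d o == pvCls d nid) :=
      fun h => hdisj nid List.mem_cons_self (List.mem_of_mem_filter h)
    have hidx : List.idxOf nid ((pre ++ nid :: rest).filter (fun o => pvCls d o == pvCls d nid))
        = pre.countP (fun o => pvCls d o == pvCls d nid) := by
      rw [hfilter, List.idxOf_append, if_neg hninpre, List.idxOf_cons_self,
        List.countP_eq_length_filter]
      omega
    have hfun : (fun p => if p = pvCls d nid
            then (pre.countP (fun o => pvCls d o == p) : Int) + 1
            else (pre.countP (fun o => pvCls d o == p) : Int))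
        = (fun p => ((pre ++ [nid]).countP (fun o => pvCls d o == p) : Int)) := by
      funext p
      rw [List.countP_append, List.countP_singleton]
      by_cases h : p = pvCls d nid
      · subst h; simp
      · have hb : (pvCls d nid == p) = false := by
          simp only [beq_eq_false_iff_ne]; exact fun e => h e.symm
        simp [h, hb]
    simp only [pvBuild, List.map_cons, hidx, hfun]
    refine congrArg₂ _ rfl ?_
    rw [ih (pre ++ [nid]) hndr ?disj]
    · apply List.map_congr_left
      intro nid' hm
      rw [happ]
    case disj =>
      intro nid' hm
      simp only [List.mem_append, List.mem_singleton]
      rintro (h | h)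
      · exact hdisj nid' (List.mem_cons_of_mem _ hm) h
      · exact hnotin (h ▸ hm)

-- B's grouping pass computes the per-class filters
lemma groups_eq (d : PySem.Dict Int String) :
    ∀ (ids : List Int) (a b t : List Int),
    (∀ nid ∈ ids, pvCls d nid = "mother" ∨ pvCls d nid = "intermediate" ∨ pvCls d nid = "track") →
    ids.foldl (pvGroupStep d)
      (PySem.Dict.mk [("mother", a), ("intermediate", b), ("track", t)])
      = PySem.Dict.mk
          [("mother", a ++ ids.filter (fun o => pvCls d o == "mother")),
           ("intermediate", b ++ ids.filter (fun o => pvCls d o == "intermediate")),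
           ("track", t ++ ids.filter (fun o => pvCls d o == "track"))] := by
  intro ids
  induction ids with
  | nil => intro a b t _; simp
  | cons nid rest ih =>
    intro a b t hcls
    rw [List.foldl_cons]
    have hrest := fun n hn => hcls n (List.mem_cons_of_mem _ hn)
    rcases hcls nid List.mem_cons_self with h | h | h
    · have hstep : pvGroupStep d (PySem.Dict.mk [("mother", a), ("intermediate", b), ("track", t)]) nid
          = PySem.Dict.mk [("mother", a ++ [nid]), ("intermediate", b), ("track", t)] := by
        unfold pvCls at h
        simp only [pvGroupStep]
        rw [h]
        simp [PySem.Dict.modify, PySem.Dict.insert, PySem.Dict.contains,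
          PySem.Dict.getD, PySem.Dict.get?]
      rw [hstep, ih _ _ _ hrest]
      simp [h]
    · have hstep : pvGroupStep d (PySem.Dict.mk [("mother", a), ("intermediate", b), ("track", t)]) nid
          = PySem.Dict.mk [("mother", a), ("intermediate", b ++ [nid]), ("track", t)] := by
        unfold pvCls at h
        simp only [pvGroupStep]
        rw [h]
        simp [PySem.Dict.modify, PySem.Dict.insert, PySem.Dict.contains,
          PySem.Dict.getD, PySem.Dict.get?]
      rw [hstep, ih _ _ _ hrest]
      simp [h]
    · have hstep : pvGroupStep d (PySem.Dict.mk [("mother", a), ("intermediate", b), ("track", t)]) nid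
          = PySem.Dict.mk [("mother", a), ("intermediate", b), ("track", t ++ [nid])] := by
        unfold pvCls at h
        simp only [pvGroupStep]
        rw [h]
        simp [PySem.Dict.modify, PySem.Dict.insert, PySem.Dict.contains,
          PySem.Dict.getD, PySem.Dict.get?]
      rw [hstep, ih _ _ _ hrest]
      simp [h]

-- one group's enumeration pass appends its (node_id, (index, class)) pairs
lemma place_items (c : String) (L : List Int) (pl : PySem.Dict Int (Int × String))
    (hL : L.Nodup) (hfresh : ∀ x ∈ L, pl.contains x = false) :
    (pvPlaceGroup pl (c, L)).items
      = pl.items ++ (PySem.List.enumerate L 0).map (fun e => (e.2, (e.1, c))) := by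
  unfold pvPlaceGroup
  exact PySem.Dict.items_foldl_insert_fresh (PySem.List.enumerate L 0)
    (fun e => e.2) (fun e => (e.1, c)) pl
    (fun a ha => hfresh a.2 (by
      have := PySem.List.map_snd_enumerate L 0
      exact this ▸ List.mem_map_of_mem ha))
    (by rw [PySem.List.map_snd_enumerate]; exact hL)

-- the class of every sorted key is one of the three (under Pre_)
lemma cls_mem_three (pt : List (Int × String)) (hpre : Pre_reindex_particle_types_by_class pt) :
    ∀ nid ∈ PySem.List.sorted (PySem.Dict.keys (PySem.Dict.mk pt)) (fun x => x) false,
      pvCls (PySem.Dict.mk pt) nid = "mother" ∨ pvCls (PySem.Dict.mk pt) nid = "intermediate" ∨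
        pvCls (PySem.Dict.mk pt) nid = "track" := by
  intro nid hm
  have hkey : nid ∈ PySem.Dict.keys (PySem.Dict.mk pt) :=
    (PySem.List.mem_sorted _ _ _ _).mp hm
  have hne : PySem.Dict.get? (PySem.Dict.mk pt) nid ≠ none := by
    rw [Ne, PySem.Dict.get?_eq_none_iff_not_mem_keys]
    exact fun h => h hkey
  obtain ⟨v, hv⟩ := Option.ne_none_iff_exists'.mp hne
  have hitems : (nid, v) ∈ (PySem.Dict.mk pt).items :=
    PySem.Dict.mem_items_of_get?_eq_some _ hv
  have hval := hpre.2 (nid, v) hitems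
  have hcls : pvCls (PySem.Dict.mk pt) nid = v := by
    unfold pvCls
    rw [PySem.Dict.getD_eq_get?_getD, hv]
    rfl
  rw [hcls]
  exact hval

-- the sorted key list has no duplicates (under Pre_)
lemma sorted_keys_nodup (pt : List (Int × String)) (hpre : Pre_reindex_particle_types_by_class pt) :
    (PySem.List.sorted (PySem.Dict.keys (PySem.Dict.mk pt)) (fun x => x) false).Nodup := by
  have hkeys : PySem.Dict.keys (PySem.Dict.mk pt) = pt.map Prod.fst := by
    simp [PySem.Dict.keys]
  exact (PySem.List.sorted_perm _ _ _).nodup_iff.mpr (hkeys ▸ hpre.1)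


-- one class's (node_id, (index, class)) pairs
def pvChunk (c : String) (L : List Int) : List (Int × Int × String) :=
  (PySem.List.enumerate L 0).map (fun e => (e.2, (e.1, c)))

-- B = the idxOf-in-class-filter map
lemma altB_eq_map (pt : List (Int × String)) (hpre : Pre_reindex_particle_types_by_class pt) :
    reindex_particle_types_by_class_alt pt
      = (PySem.List.sorted (PySem.Dict.keys (PySem.Dict.mk pt)) (fun x => x) false).map
          (fun nid => (nid,
            ((List.idxOf nid (((PySem.List.sorted (PySem.Dict.keys (PySem.Dict.mk pt)) (fun x => x) false)).filter
                (fun o => pvCls (PySem.Dict.mk pt) o == pvCls (PySem.Dict.mk pt) nid)) : Int),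
             pvCls (PySem.Dict.mk pt) nid))) := by
  have hidsN := sorted_keys_nodup pt hpre
  have hcls := cls_mem_three pt hpre
  set d : PySem.Dict Int String := PySem.Dict.mk pt with hd
  set ids : List Int := PySem.List.sorted (PySem.Dict.keys d) (fun x => x) false with hids
  set Lm : List Int := ids.filter (fun o => pvCls d o == "mother") with hLm
  set Li : List Int := ids.filter (fun o => pvCls d o == "intermediate") with hLi
  set Lt : List Int := ids.filter (fun o => pvCls d o == "track") with hLt
  have hdisj : ∀ (c1 c2 : String), c1 ≠ c2 →
      List.Disjoint (ids.filter (fun o => pvCls d o == c1)) (ids.filter (fun o => pvCls d o == c2)) := by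
    intro c1 c2 hne x h1 h2
    have e1 := beq_iff_eq.mp (List.mem_filter.mp h1).2
    have e2 := beq_iff_eq.mp (List.mem_filter.mp h2).2
    exact hne (e1.symm.trans e2)
  have hNm : Lm.Nodup := hidsN.filter _
  have hNi : Li.Nodup := hidsN.filter _
  have hNt : Lt.Nodup := hidsN.filter _
  have hdef : reindex_particle_types_by_class_alt pt
      = (ids.foldl
          (pvAssembleStep
            (((ids.foldl (pvGroupStep d)
                (PySem.Dict.mk [("mother", []), ("intermediate", []), ("track", [])])).items).foldl
              pvPlaceGroup PySem.Dict.empty))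
          PySem.Dict.empty).items := rfl
  rw [hdef, groups_eq d ids [] [] [] hcls]
  have hfold3 : ((PySem.Dict.mk [("mother", [] ++ Lm), ("intermediate", [] ++ Li), ("track", [] ++ Lt)]).items).foldl
        pvPlaceGroup PySem.Dict.empty
      = pvPlaceGroup (pvPlaceGroup (pvPlaceGroup PySem.Dict.empty ("mother", Lm)) ("intermediate", Li)) ("track", Lt) := by
    simp
  rw [hfold3]
  -- items and keys of the three placement stages
  have hP1 : (pvPlaceGroup PySem.Dict.empty ("mother", Lm)).items = pvChunk "mother" Lm := by
    rw [place_items _ _ _ hNm (fun x _ => PySem.Dict.contains_empty x)]; rfl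
  have hK1 : (pvPlaceGroup PySem.Dict.empty ("mother", Lm)).keys = Lm := by
    show (pvPlaceGroup PySem.Dict.empty ("mother", Lm)).items.map (·.1) = Lm
    rw [hP1]
    simp only [pvChunk, List.map_map, Function.comp_def]
    exact PySem.List.map_snd_enumerate Lm 0
  have hfresh2 : ∀ x ∈ Li, (pvPlaceGroup PySem.Dict.empty ("mother", Lm)).contains x = false := by
    intro x hx
    rw [PySem.Dict.contains_eq_decide_mem_keys, hK1]
    simp only [decide_eq_false_iff_not]
    exact fun hxm => hdisj "mother" "intermediate" (by decide) hxm hx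
  have hP2 : (pvPlaceGroup (pvPlaceGroup PySem.Dict.empty ("mother", Lm)) ("intermediate", Li)).items
      = pvChunk "mother" Lm ++ pvChunk "intermediate" Li := by
    rw [place_items _ _ _ hNi hfresh2, hP1]; rfl
  have hK2 : (pvPlaceGroup (pvPlaceGroup PySem.Dict.empty ("mother", Lm)) ("intermediate", Li)).keys
      = Lm ++ Li := by
    show (pvPlaceGroup (pvPlaceGroup PySem.Dict.empty ("mother", Lm)) ("intermediate", Li)).items.map (·.1) = Lm ++ Li
    rw [hP2]
    simp only [List.map_append, pvChunk, List.map_map, Function.comp_def]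
    rw [PySem.List.map_snd_enumerate, PySem.List.map_snd_enumerate]
  have hfresh3 : ∀ x ∈ Lt,
      (pvPlaceGroup (pvPlaceGroup PySem.Dict.empty ("mother", Lm)) ("intermediate", Li)).contains x = false := by
    intro x hx
    rw [PySem.Dict.contains_eq_decide_mem_keys, hK2]
    simp only [decide_eq_false_iff_not, List.mem_append]
    rintro (hxm | hxi)
    · exact hdisj "mother" "track" (by decide) hxm hx
    · exact hdisj "intermediate" "track" (by decide) hxi hx
  have hP3 : (pvPlaceGroup (pvPlaceGroup (pvPlaceGroup PySem.Dict.empty ("mother", Lm)) ("intermediate", Li)) ("track", Lt)).items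
      = (pvChunk "mother" Lm ++ pvChunk "intermediate" Li) ++ pvChunk "track" Lt := by
    rw [place_items _ _ _ hNt hfresh3, hP2]; rfl
  have hK3 : (pvPlaceGroup (pvPlaceGroup (pvPlaceGroup PySem.Dict.empty ("mother", Lm)) ("intermediate", Li)) ("track", Lt)).keys
      = (Lm ++ Li) ++ Lt := by
    show (pvPlaceGroup (pvPlaceGroup (pvPlaceGroup PySem.Dict.empty ("mother", Lm)) ("intermediate", Li)) ("track", Lt)).items.map (·.1)
      = (Lm ++ Li) ++ Lt
    rw [hP3]
    simp only [List.map_append, pvChunk, List.map_map, Function.comp_def]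
    rw [PySem.List.map_snd_enumerate, PySem.List.map_snd_enumerate, PySem.List.map_snd_enumerate]
  have hKN : ((Lm ++ Li) ++ Lt).Nodup := by
    refine ((hNm.append hNi (hdisj _ _ (by decide))).append hNt ?_)
    rw [List.disjoint_append_left]
    exact ⟨hdisj _ _ (by decide), hdisj _ _ (by decide)⟩
  set P := pvPlaceGroup (pvPlaceGroup (pvPlaceGroup PySem.Dict.empty ("mother", Lm)) ("intermediate", Li)) ("track", Lt) with hP
  have hasm : (ids.foldl (pvAssembleStep P) PySem.Dict.empty).items
      = PySem.Dict.empty.items ++ ids.map (fun nid => (nid, PySem.Dict.getD P nid ((0 : Int), ""))) :=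
    PySem.Dict.items_foldl_insert_fresh ids (fun n => n)
      (fun nid => PySem.Dict.getD P nid ((0 : Int), "")) PySem.Dict.empty
      (fun a _ => PySem.Dict.contains_empty a) (by simpa using hidsN)
  rw [hasm]
  simp only [show (PySem.Dict.empty : PySem.Dict Int (Int × String)).items = [] from rfl,
    List.nil_append]
  apply List.map_congr_left
  intro nid hm
  have hPN : P.keys.Nodup := by rw [hK3]; exact hKN
  have main : ∀ (c : String) (L : List Int), L = ids.filter (fun o => pvCls d o == c) →
      pvCls d nid = c → (nid, ((List.idxOf nid L : Int), c)) ∈ P.items →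
      (nid, PySem.Dict.getD P nid ((0 : Int), ""))
        = (nid, ((List.idxOf nid (ids.filter (fun o => pvCls d o == pvCls d nid)) : Int), pvCls d nid)) := by
    intro c L hLdef hc hmem
    rw [PySem.Dict.getD_of_mem_items P hmem hPN, hc, ← hLdef]
  have hchunk : ∀ (c : String) (L : List Int), L.Nodup → nid ∈ L →
      (nid, ((List.idxOf nid L : Int), c)) ∈ pvChunk c L := by
    intro c L _ hmemL
    have hk : List.idxOf nid L < L.length := List.idxOf_lt_length_of_mem hmemL
    refine List.mem_map.mpr ⟨((List.idxOf nid L : Int), nid), ?_, rfl⟩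
    exact (PySem.List.mem_enumerate_iff _ _ _).mpr ⟨List.idxOf nid L, hk, by simp [List.getElem_idxOf hk]⟩
  rcases hcls nid hm with h | h | h
  · refine main "mother" Lm hLm h ?_
    rw [hP3]
    exact List.mem_append_left _ (List.mem_append_left _
      (hchunk _ _ hNm (List.mem_filter.mpr ⟨hm, by simp [h]⟩)))
  · refine main "intermediate" Li hLi h ?_
    rw [hP3]
    exact List.mem_append_left _ (List.mem_append_right _
      (hchunk _ _ hNi (List.mem_filter.mpr ⟨hm, by simp [h]⟩)))
  · refine main "track" Lt hLt h ?_
    rw [hP3]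
    exact List.mem_append_right _ (hchunk _ _ hNt (List.mem_filter.mpr ⟨hm, by simp [h]⟩))

-- ===== VERDICT (by name: the statement is the Claim_ definition above) =====
theorem reindex_particle_types_by_class_spec : Claim_equal_reindex_particle_types_by_class := by
  intro pt _ hpre
  unfold Spec_reindex_particle_types_by_class
  have hidsN := sorted_keys_nodup pt hpre
  have hcls := cls_mem_three pt hpre
  have h1 : ∀ nid ∈ PySem.List.sorted (PySem.Dict.keys (PySem.Dict.mk pt)) (fun x => x) false,
      (PySem.Dict.get? (PySem.Dict.mk [("mother", (0 : Int)), ("intermediate", 0), ("track", 0)])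
        (pvCls (PySem.Dict.mk pt) nid)).isSome := by
    intro nid hm
    rcases hcls nid hm with h | h | h <;> rw [h] <;> rfl
  have hAdef : reindex_particle_types_by_class pt
      = ((PySem.List.sorted (PySem.Dict.keys (PySem.Dict.mk pt)) (fun x => x) false).foldl
          (pvStepA (PySem.Dict.mk pt))
          (PySem.Dict.mk [("mother", 0), ("intermediate", 0), ("track", 0)], PySem.Dict.empty)).2.items := rfl
  have hA := loopA_items (PySem.Dict.mk pt) _ _ PySem.Dict.empty h1 hidsN
    (fun nid _ => PySem.Dict.contains_empty nid)
  have hc0 : (fun p => PySem.Dict.getD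
        (PySem.Dict.mk [("mother", (0 : Int)), ("intermediate", 0), ("track", 0)]) p 0)
      = (fun p => ((([] : List Int).countP (fun o => pvCls (PySem.Dict.mk pt) o == p) : Nat) : Int)) := by
    funext p
    rw [PySem.Dict.getD_eq_get?_getD]
    simp only [PySem.Dict.get?_mk_cons]
    split_ifs <;> rfl
  rw [hAdef, hA, hc0,
    pvBuild_eq_map (PySem.Dict.mk pt) _ [] hidsN (by simp),
    altB_eq_map pt hpre]
  simp [show (PySem.Dict.empty : PySem.Dict Int (Int × String)).items = [] from rfl]
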